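-- pv_equiv track=rewrite | github.com/andreaMazzei/PDPTW | Models/DARP/Furtado extra constraints/read_data.py | pair_clients
-- ===== SOURCE A (Python) =====
-- def pair_clients(delivery_points, companies):
--     associated_company = {}
--     # Ideal clients per company
--     clients_per_company = len(delivery_points) // len(companies)
--     # Clients that can't be divided evenly
--     leftover_clients = len(delivery_points) % len(companies)
--
--     start_index = 0
--     for company in companies:
--         end_index = start_index + clients_per_company
--         if leftover_clients > 0:
--             end_index += 1  # Assign one extra client to balance
--             leftover_clients -= 1
--
--         company_clients = delivery_points[start_index:end_index]  # Get clients for this company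
--         for client in company_clients:
--             associated_company[client] = company
--
--         start_index = end_index  # Move to the next batch of clients
--
--     return associated_company
-- ===== SOURCE B (Python) =====
-- def pair_clients(delivery_points, companies):
--     base, r = divmod(len(delivery_points), len(companies))
--     cut = r * (base + 1)
--     return {p: companies[j // (base + 1) if j < cut else r + (j - cut) // base]
--             for j, p in enumerate(delivery_points)}
-- ===== Notes on version B (the rewrite author's own statement) =====
-- stated objective: alternative
-- what changed: Replaces A's per-company loop with running start/end/leftover counters and repeated slicing by a single pass over the delivery points that computes each point's company index by closed-form arithmetic (j//(base+1) in the first r oversized batches, else r+(j-cut)//base) and builds the dict in one comprehension.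
import Mathlib
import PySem

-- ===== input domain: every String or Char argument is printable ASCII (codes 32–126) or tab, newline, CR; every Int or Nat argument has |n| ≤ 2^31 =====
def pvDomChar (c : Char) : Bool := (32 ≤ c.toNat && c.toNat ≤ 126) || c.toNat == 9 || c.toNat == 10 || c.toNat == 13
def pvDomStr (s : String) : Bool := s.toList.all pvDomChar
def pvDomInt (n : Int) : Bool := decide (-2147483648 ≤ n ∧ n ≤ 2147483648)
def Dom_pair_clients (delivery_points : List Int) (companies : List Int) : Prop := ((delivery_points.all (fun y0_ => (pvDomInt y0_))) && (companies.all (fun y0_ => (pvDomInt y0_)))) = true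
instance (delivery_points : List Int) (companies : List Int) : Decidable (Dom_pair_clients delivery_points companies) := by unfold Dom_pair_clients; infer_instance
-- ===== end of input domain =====

-- B replaces A's per-company slice loop (running start/end/leftover counters) by one pass over
-- the delivery points computing each point's company index by closed-form arithmetic (objective: alternative).

-- ===== PORT A =====
-- the 'for company in companies' loop: state = (dict, leftover_clients, start_index)
def pairLoopA (pts : List Int) (base : Int) : List Int → PySem.Dict Int Int → Int → Int → PySem.Dict Int Int
  | [], d, _, _ => d
  | c :: rest, d, lo, s =>
      let e0 := s + base
      let e := if lo > 0 then e0 + 1 else e0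
      let lo' := if lo > 0 then lo - 1 else lo
      let chunk := PySem.List.slice pts (some s) (some e)
      let d' := chunk.foldl (fun acc cl => acc.insert cl c) d
      pairLoopA pts base rest d' lo' e

def pair_clients (delivery_points : List Int) (companies : List Int) : List (Int × Int) :=
  let clients_per_company := PySem.Int.floordiv (delivery_points.length : Int) (companies.length : Int)
  let leftover_clients := PySem.Int.mod (delivery_points.length : Int) (companies.length : Int)
  (pairLoopA delivery_points clients_per_company companies PySem.Dict.empty leftover_clients 0).items

-- ===== PORT B =====
-- dict comprehension over enumerate(delivery_points); companies[idx] is always in range under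
-- Pre_ (companies ≠ []), so the '.getD 0' default of pyGet? is never used.
def pair_clients_alt (delivery_points : List Int) (companies : List Int) : List (Int × Int) :=
  let base := PySem.Int.floordiv (delivery_points.length : Int) (companies.length : Int)
  let r := PySem.Int.mod (delivery_points.length : Int) (companies.length : Int)
  let cut := r * (base + 1)
  ((PySem.List.enumerate delivery_points 0).foldl (fun d jp =>
      d.insert jp.2 ((PySem.List.pyGet? companies
        (if jp.1 < cut then PySem.Int.floordiv jp.1 (base + 1)
         else r + PySem.Int.floordiv (jp.1 - cut) base)).getD 0)) PySem.Dict.empty).items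

-- ===== PRECONDITION & SPEC =====
-- Pre_ excludes exactly companies = [], on which Python A (len // 0) raises ZeroDivisionError.
def Pre_pair_clients (delivery_points : List Int) (companies : List Int) : Prop := companies ≠ []
instance (delivery_points : List Int) (companies : List Int) : Decidable (Pre_pair_clients delivery_points companies) := by unfold Pre_pair_clients; infer_instance
def pvWitness_pair_clients : List Int × List Int := ([1, 2, 3, 4, 5], [10, 20])

def Spec_pair_clients (delivery_points : List Int) (companies : List Int) (out : List (Int × Int)) : Prop := out = pair_clients_alt delivery_points companies
instance (delivery_points : List Int) (companies : List Int) (out : List (Int × Int)) : Decidable (Spec_pair_clients delivery_points companies out) := by unfold Spec_pair_clients; infer_instance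

-- ===== CLAIM (what is proved, stated in full; the proofs are below) =====
def Claim_equal_pair_clients : Prop := ∀ (delivery_points : List Int) (companies : List Int), Dom_pair_clients delivery_points companies → Pre_pair_clients delivery_points companies → Spec_pair_clients delivery_points companies (pair_clients delivery_points companies)

-- ===== LEMMAS AND PROOFS =====

-- the per-company assignment list, with an explicit leftover counter (Nat form of A's loop)
def pvExpand (b : Nat) : Nat → List Int → List Int
  | _, [] => []
  | lo, c :: rest => List.replicate (b + if 0 < lo then 1 else 0) c ++ pvExpand b (lo - 1) rest

-- the closed-form company index of B, in Nat form
def pvIdx (b lo j : Nat) : Nat :=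
  if j < lo * (b + 1) then j / (b + 1) else lo + (j - lo * (b + 1)) / b

theorem pv_zip_append_right {α β : Type} (xs ys : List β) :
    ∀ (l : List α), List.zip l (xs ++ ys)
      = List.zip (l.take xs.length) xs ++ List.zip (l.drop xs.length) ys := by
  induction xs with
  | nil => intro l; simp
  | cons x xs ih =>
      intro l
      cases l with
      | nil => simp
      | cons a l => simp [List.zip_cons_cons, ih l]

theorem pv_zip_replicate {α : Type} (c : α) :
    ∀ (l : List α) (k : Nat), l.length ≤ k →
      List.zip l (List.replicate k c) = l.map (fun x => (x, c)) := by
  intro l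
  induction l with
  | nil => intro k _; simp
  | cons a l ih =>
      intro k hk
      cases k with
      | zero => simp at hk
      | succ k =>
          simp only [List.replicate_succ, List.zip_cons_cons, List.map_cons]
          rw [ih k (by simpa using hk)]

theorem pv_loopA_eq (pts : List Int) (b : Nat) :
    ∀ (cs : List Int) (d : PySem.Dict Int Int) (lo s : Nat),
      pairLoopA pts (b : Int) cs d (lo : Int) (s : Int)
        = (List.zip (pts.drop s) (pvExpand b lo cs)).foldl (fun acc p => acc.insert p.1 p.2) d := by
  intro cs
  induction cs with
  | nil => intro d lo s; simp [pairLoopA, pvExpand]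
  | cons c rest ih =>
      intro d lo s
      have hk : ∀ (k : Nat),
          (List.zip ((pts.drop s).take k) (List.replicate k c)).foldl
              (fun acc p => acc.insert p.1 p.2) d
            = ((pts.drop s).take k).foldl (fun acc cl => acc.insert cl c) d := by
        intro k
        rw [pv_zip_replicate c _ k (by simpa using List.length_take_le k (pts.drop s))]
        rw [List.foldl_map]
      set k : Nat := b + (if 0 < lo then 1 else 0) with hkdef
      have he : (if (lo : Int) > 0 then (s : Int) + (b : Int) + 1 else (s : Int) + (b : Int))
          = ((s + k : Nat) : Int) := by
        by_cases h : 0 < lo <;> simp [hkdef, h] <;> ring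
      have hlo : (if (lo : Int) > 0 then (lo : Int) - 1 else (lo : Int))
          = ((lo - 1 : Nat) : Int) := by
        by_cases h : 0 < lo <;> simp [h] <;> omega
      show pairLoopA pts (b : Int) (c :: rest) d (lo : Int) (s : Int) = _
      rw [pairLoopA]
      rw [he, hlo]
      have hslice : PySem.List.slice pts (some (s : Int)) (some ((s + k : Nat) : Int))
          = (pts.drop s).take k := by
        simpa [Nat.cast_add] using PySem.List.slice_natCast_add pts s k
      rw [hslice, ih]
      have hexp : pvExpand b lo (c :: rest)
          = List.replicate k c ++ pvExpand b (lo - 1) rest := by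
        simp [pvExpand, hkdef]
      rw [hexp, pv_zip_append_right, List.foldl_append]
      simp only [List.length_replicate, hk, List.drop_drop]

theorem pv_expand_length (b : Nat) :
    ∀ (cs : List Int) (lo : Nat),
      (pvExpand b lo cs).length = cs.length * b + min lo cs.length := by
  intro cs
  induction cs with
  | nil => intro lo; simp [pvExpand]
  | cons c rest ih =>
      intro lo
      simp only [pvExpand, List.length_append, List.length_replicate, ih, List.length_cons,
        Nat.add_mul, Nat.one_mul]
      by_cases h : 0 < lo <;> simp [h] <;> omega

theorem pv_expand_getElem? (b : Nat) :
    ∀ (cs : List Int) (lo j : Nat), j < cs.length * b + min lo cs.length →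
      (pvExpand b lo cs)[j]? = cs[pvIdx b lo j]? := by
  intro cs
  induction cs with
  | nil => intro lo j h; simp at h
  | cons c rest ih =>
      intro lo j h
      set k : Nat := b + (if 0 < lo then 1 else 0) with hkdef
      have hexp : pvExpand b lo (c :: rest)
          = List.replicate k c ++ pvExpand b (lo - 1) rest := by
        simp [pvExpand, hkdef]
      by_cases hj : j < k
      · -- head chunk: index 0
        have h0 : pvIdx b lo j = 0 := by
          unfold pvIdx
          by_cases hlo : 0 < lo
          · have hjb : j < b + 1 := by simp [hkdef, hlo] at hj; omega
            have hcut : j < lo * (b + 1) := by nlinarith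
            rw [if_pos hcut]
            exact Nat.div_eq_of_lt hjb
          · have hlo0 : lo = 0 := by omega
            subst hlo0
            have hjb : j < b := by simp [hkdef] at hj; omega
            simp [Nat.div_eq_of_lt hjb]
        rw [hexp, h0]
        rw [List.getElem?_append_left (by simpa using hj)]
        simp [hj]
      · -- tail: recurse at j - k
        have hjk : k ≤ j := by omega
        have hrec : j - k < rest.length * b + min (lo - 1) rest.length := by
          simp only [List.length_cons] at h
          by_cases hlo : 0 < lo <;> simp [hkdef, hlo, Nat.add_mul] at hjk h ⊢ <;> omega
        have hidx : pvIdx b lo j = pvIdx b (lo - 1) (j - k) + 1 := by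
          unfold pvIdx
          by_cases hlo : 0 < lo
          · obtain ⟨l, rfl⟩ : ∃ l, lo = l + 1 := ⟨lo - 1, by omega⟩
            have hk1 : k = b + 1 := by simp [hkdef]
            have hmul : (l + 1) * (b + 1) = l * (b + 1) + (b + 1) := by ring
            rw [hk1] at hjk
            simp only [Nat.add_sub_cancel]
            by_cases hcut : j < (l + 1) * (b + 1)
            · have hcut' : j - k < l * (b + 1) := by rw [hk1]; omega
              rw [if_pos hcut, if_pos hcut', hk1]
              calc j / (b + 1) = ((j - (b + 1)) + (b + 1)) / (b + 1) := by
                    rw [Nat.sub_add_cancel hjk]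
                _ = (j - (b + 1)) / (b + 1) + 1 := Nat.add_div_right _ (by omega)
            · have hcut' : ¬ j - k < l * (b + 1) := by rw [hk1]; omega
              rw [if_neg hcut, if_neg hcut']
              have harg : j - k - l * (b + 1) = j - (l + 1) * (b + 1) := by rw [hk1]; omega
              rw [harg]
              generalize (j - (l + 1) * (b + 1)) / b = q
              omega
          · have hlo0 : lo = 0 := by omega
            subst hlo0
            have hk0 : k = b := by simp [hkdef]
            rw [hk0] at hjk
            have hb : 0 < b := by
              by_contra hb0
              have hb0' : b = 0 := by omega
              subst hb0'
              simp at h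
            simp only [Nat.zero_sub, Nat.zero_mul, Nat.not_lt_zero, if_false, Nat.sub_zero,
              Nat.zero_add, hk0]
            calc j / b = ((j - b) + b) / b := by rw [Nat.sub_add_cancel hjk]
              _ = (j - b) / b + 1 := Nat.add_div_right _ hb
        rw [hexp, hidx]
        rw [List.getElem?_append_right (by simpa using hjk)]
        simp only [List.length_replicate]
        rw [ih (lo - 1) (j - k) hrec]
        simp

-- ===== VERDICT (by name: the statement is the Claim_ definition above) =====
theorem pair_clients_spec : Claim_equal_pair_clients := by
  intro pts cs _ hpre
  unfold Spec_pair_clients pair_clients pair_clients_alt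
  simp only [PySem.Int.floordiv_natCast, PySem.Int.mod_natCast]
  have hm : 0 < cs.length := List.length_pos_iff.mpr hpre
  set n := pts.length with hn
  set m := cs.length with hmdef
  set b : Nat := n / m with hb
  set r : Nat := n % m with hr
  have hrm : r < m := Nat.mod_lt _ hm
  have hlen : (pvExpand b r cs).length = n := by
    rw [pv_expand_length, ← hmdef, Nat.min_eq_left (by omega), hb, hr]
    exact Nat.div_add_mod n m
  -- A side
  have hA := pv_loopA_eq pts b cs PySem.Dict.empty r 0
  simp only [Nat.cast_zero, List.drop_zero] at hA
  rw [hA]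
  -- B side: turn the enumerate fold into a fold of inserts over a pair list
  have hBmap : ((PySem.List.enumerate pts 0).foldl (fun d jp =>
        d.insert jp.2 ((PySem.List.pyGet? cs
          (if jp.1 < (r : Int) * ((b : Int) + 1) then PySem.Int.floordiv jp.1 ((b : Int) + 1)
           else (r : Int) + PySem.Int.floordiv (jp.1 - (r : Int) * ((b : Int) + 1)) (b : Int))).getD 0))
        PySem.Dict.empty)
      = (((PySem.List.enumerate pts 0).map (fun jp => (jp.2, (PySem.List.pyGet? cs
          (if jp.1 < (r : Int) * ((b : Int) + 1) then PySem.Int.floordiv jp.1 ((b : Int) + 1)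
           else (r : Int) + PySem.Int.floordiv (jp.1 - (r : Int) * ((b : Int) + 1)) (b : Int))).getD 0))).foldl
          (fun acc p => acc.insert p.1 p.2) PySem.Dict.empty) := by
    rw [List.foldl_map]
  rw [hBmap]
  -- the two pair lists coincide
  have hlists : List.zip pts (pvExpand b r cs)
      = (PySem.List.enumerate pts 0).map (fun jp => (jp.2, (PySem.List.pyGet? cs
          (if jp.1 < (r : Int) * ((b : Int) + 1) then PySem.Int.floordiv jp.1 ((b : Int) + 1)
           else (r : Int) + PySem.Int.floordiv (jp.1 - (r : Int) * ((b : Int) + 1)) (b : Int))).getD 0)) := by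
    apply List.ext_getElem
    · simp [hlen, PySem.List.length_enumerate]
      omega
    · intro i h1 h2
      have hi : i < n := by simp [hlen] at h1; omega
      have hiE : i < (PySem.List.enumerate pts 0).length := by
        simp [PySem.List.length_enumerate]; omega
      have hgetE : (PySem.List.enumerate pts 0)[i]'hiE
          = ((0 : Int) + i, pts[i]'(by omega)) := PySem.List.getElem_enumerate ..
      have hexp? : (pvExpand b r cs)[i]? = cs[pvIdx b r i]? :=
        pv_expand_getElem? b cs r i (by rw [← pv_expand_length]; omega)
      have hidxlt : pvIdx b r i < m := by
        have hsome : (pvExpand b r cs)[i]? = some ((pvExpand b r cs)[i]'(by omega)) :=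
          List.getElem?_eq_getElem _
        rw [hexp?] at hsome
        have := List.getElem?_eq_some_iff.mp hsome
        exact this.1
      have hexpI : (pvExpand b r cs)[i]'(by omega) = cs[pvIdx b r i]'(hidxlt) := by
        have hsome : (pvExpand b r cs)[i]? = some ((pvExpand b r cs)[i]'(by omega)) :=
          List.getElem?_eq_getElem _
        rw [hexp?, List.getElem?_eq_getElem (h := hidxlt)] at hsome
        exact (Option.some.injEq _ _ ▸ hsome).symm
      -- evaluate B's Int arithmetic at index (i : Nat)
      have hval : (if ((0 : Int) + i) < (r : Int) * ((b : Int) + 1)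
            then PySem.Int.floordiv ((0 : Int) + i) ((b : Int) + 1)
            else (r : Int) + PySem.Int.floordiv (((0 : Int) + i) - (r : Int) * ((b : Int) + 1)) (b : Int))
          = ((pvIdx b r i : Nat) : Int) := by
        unfold pvIdx
        by_cases hcut : i < r * (b + 1)
        · have hcut' : ((0 : Int) + i) < (r : Int) * ((b : Int) + 1) := by
            have h' := hcut
            zify at h'
            push_cast at h' ⊢
            linarith
          rw [if_pos hcut', if_pos hcut]
          have : ((0 : Int) + i) = ((i : Nat) : Int) := by push_cast; ring
          rw [this]
          have : ((b : Int) + 1) = (((b + 1 : Nat)) : Int) := by push_cast; ring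
          rw [this, PySem.Int.floordiv_natCast]
        · have hle : r * (b + 1) ≤ i := by omega
          have hcut' : ¬ ((0 : Int) + i) < (r : Int) * ((b : Int) + 1) := by
            have h' := hle
            zify at h'
            push_cast at h' ⊢
            linarith
          rw [if_neg hcut', if_neg hcut]
          have hsub : ((0 : Int) + i) - (r : Int) * ((b : Int) + 1)
              = (((i - r * (b + 1) : Nat)) : Int) := by
            rw [Nat.cast_sub hle]
            push_cast
            ring
          rw [hsub, PySem.Int.floordiv_natCast]
          push_cast; ring
      rw [List.getElem_zip, List.getElem_map, hgetE]
      simp only [hval, PySem.List.pyGet?_natCast]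
      rw [List.getElem?_eq_getElem (h := hidxlt)]
      simp [hexpI]
  rw [hlists]
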